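-- pv_equiv track=rewrite | github.com/SmaF1-dev/Algorithms_and_Data-Structures | lab4/task11/src/main.py | end_day
-- ===== SOURCE A (Python) =====
-- class Queue:
--     def __init__(self):
--         self.queue = []
--
--     def push(self, x):
--         self.queue.append(x)
--
--     def pop(self):
--         el = self.queue.pop(0)
--         return el
--
--     def set(self, lst):
--         self.queue = lst
--
-- def end_day(m,lst):
--     queue = Queue()
--     queue.set(lst.copy())
--     for i in range(m):
--         elem = queue.pop()-1
--         if elem > 0:
--             queue.push(elem)
--     return (len(queue.queue), queue.queue)
-- ===== SOURCE B (Python) =====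
-- def end_day(m, lst):
--     # closed form: count completed decrement rounds via sums of min(cap, k),
--     # find the last completed round k by binary search, then finish the
--     # partial round with one slice pass.  caps[i] = max(v,1) = total pops element i takes.
--     mm = max(m, 0)
--     total = sum(max(v, 1) for v in lst)
--     if total <= mm:
--         return (0, [])
--
--     def f(k):  # pops consumed by k full rounds
--         return sum(min(max(v, 1), k) for v in lst)
--
--     hi = max(max(v, 1) for v in lst)  # f(hi) == total > mm
--     lo = 0                            # f(0) == 0 <= mm
--     while hi - lo > 1:
--         mid = (lo + hi) // 2
--         if f(mid) <= mm:
--             lo = mid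
--         else:
--             hi = mid
--     k = lo                            # f(k) <= mm < f(k+1)
--     t = mm - f(k)                     # pops already done in round k+1
--     survivors = [v - k for v in lst if max(v, 1) > k]
--     done = [w - 1 for w in survivors[:t] if w - 1 > 0]
--     result = survivors[t:] + done
--     return (len(result), result)
-- ===== Notes on version B (the rewrite author's own statement) =====
-- stated objective: faster
-- what changed: B replaces the m-step queue simulation by a closed form: it counts completed decrement rounds k via f(k)=sum(min(max(v,1),k)) found by binary search, then rebuilds the final queue with one slice pass over the round-k survivors.
import Mathlib
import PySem

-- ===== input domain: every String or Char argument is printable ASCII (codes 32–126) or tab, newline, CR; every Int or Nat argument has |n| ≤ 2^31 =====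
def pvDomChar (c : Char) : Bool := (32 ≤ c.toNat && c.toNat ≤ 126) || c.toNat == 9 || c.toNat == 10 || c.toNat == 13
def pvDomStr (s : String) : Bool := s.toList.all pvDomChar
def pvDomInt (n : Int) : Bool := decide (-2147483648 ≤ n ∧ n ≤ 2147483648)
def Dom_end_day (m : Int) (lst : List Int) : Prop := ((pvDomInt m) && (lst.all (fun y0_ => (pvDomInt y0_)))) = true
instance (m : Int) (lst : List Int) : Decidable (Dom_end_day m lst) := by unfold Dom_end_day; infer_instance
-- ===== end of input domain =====

-- B replaces A's m-step queue simulation by a closed form (completed rounds found by binary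
-- search on f(k) = Σ min(max v 1, k), then one slice pass over the round-k survivors).

-- ===== PORT A =====
-- the for-loop over range(m): one step per pop; on an empty queue Python's pop(0)
-- raises IndexError — those inputs are excluded by Pre_, the [] branch only makes the port total
def endDayLoop : Nat → List Int → List Int
  | 0, q => q
  | n+1, q =>
    match q with
    | [] => []
    | x :: rest =>
      let elem := x - 1
      if elem > 0 then endDayLoop n (rest ++ [elem]) else endDayLoop n rest

def end_day (m : Int) (lst : List Int) : Int × List Int :=
  let q := endDayLoop m.toNat lst
  ((q.length : Int), q)

-- ===== PORT B =====
-- f(k) of Source B: pops consumed by k full rounds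
def fPops (k : Int) (lst : List Int) : Int := (lst.map (fun v => min (max v 1) k)).sum

-- Source B's list comprehension [v - k for v in lst if max(v, 1) > k]
def survivorsOf (k : Int) (lst : List Int) : List Int :=
  (lst.filter (fun v => decide (k < max v 1))).map (fun v => v - k)

-- Source B's while-loop binary search; fuel = initial hi - lo, an upper bound on the iteration count
def bsearchK (fuel : Nat) (lo hi mm : Int) (lst : List Int) : Int :=
  match fuel with
  | 0 => lo
  | fuel+1 =>
    if hi - lo ≤ 1 then lo
    else
      let mid := PySem.Int.floordiv (lo + hi) 2
      if fPops mid lst ≤ mm then bsearchK fuel mid hi mm lst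
      else bsearchK fuel lo mid mm lst

def end_day_alt (m : Int) (lst : List Int) : Int × List Int :=
  let mm := max m 0
  let total := (lst.map (fun v => max v 1)).sum
  if total ≤ mm then (0, [])
  else
    -- max(max(v, 1) for v in lst): lst is nonempty here and every cap ≥ 1 > 0, so foldl max 0 is exact
    let hi := (lst.map (fun v => max v 1)).foldl max 0
    let k := bsearchK hi.toNat 0 hi mm lst
    let t := mm - fPops k lst
    let survivors := survivorsOf k lst
    -- slices survivors[:t] / survivors[t:] with 0 ≤ t ≤ len are exactly take/drop of t.toNat
    let done := ((survivors.take t.toNat).map (fun w => w - 1)).filter (fun w => decide (0 < w))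
    let result := survivors.drop t.toNat ++ done
    ((result.length : Int), result)

-- ===== PRECONDITION & SPEC =====
-- Pre_: exactly the inputs where A returns; for larger m the queue empties and pop(0) raises IndexError
def Pre_end_day (m : Int) (lst : List Int) : Prop := m ≤ (lst.map (fun v => max v 1)).sum
instance (m : Int) (lst : List Int) : Decidable (Pre_end_day m lst) := by unfold Pre_end_day; infer_instance
def pvWitness_end_day : Int × List Int := (3, [3, 1])

def Spec_end_day (m : Int) (lst : List Int) (out : Int × List Int) : Prop := out = end_day_alt m lst
instance (m : Int) (lst : List Int) (out : Int × List Int) : Decidable (Spec_end_day m lst out) := by unfold Spec_end_day; infer_instance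

-- ===== CLAIM (what is proved, stated in full; the proofs are below) =====
def Claim_equal_end_day : Prop := ∀ (m : Int) (lst : List Int), Dom_end_day m lst → Pre_end_day m lst → Spec_end_day m lst (end_day m lst)

-- ===== LEMMAS AND PROOFS =====

lemma endDayLoop_nil (n : Nat) : endDayLoop n [] = [] := by cases n <;> simp [endDayLoop]

lemma endDayLoop_add (a b : Nat) (q : List Int) :
    endDayLoop (a + b) q = endDayLoop b (endDayLoop a q) := by
  induction a generalizing q with
  | zero => simp [endDayLoop]
  | succ a ih =>
    have h : a + 1 + b = (a + b) + 1 := by omega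
    rw [h]
    cases q with
    | nil => simp [endDayLoop, endDayLoop_nil]
    | cons x rest =>
      simp only [endDayLoop]
      split_ifs <;> exact ih _

-- t pops from a queue of length ≥ t only touch the original prefix
lemma endDayLoop_partial (t : Nat) (q : List Int) (h : t ≤ q.length) :
    endDayLoop t q =
      q.drop t ++ ((q.take t).map (fun w => w - 1)).filter (fun w => decide (0 < w)) := by
  induction t generalizing q with
  | zero => simp [endDayLoop]
  | succ t ih =>
    cases q with
    | nil => simp at h
    | cons x rest =>
      simp only [List.length_cons, Nat.succ_le_succ_iff] at h
      simp only [endDayLoop, List.drop_succ_cons, List.take_succ_cons, List.map_cons,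
        List.filter_cons]
      by_cases hx : (0:Int) < x - 1
      · simp only [gt_iff_lt, hx, if_true, decide_true]
        rw [ih (rest ++ [x - 1]) (by simp; omega)]
        rw [List.drop_append_of_le_length h, List.take_append_of_le_length h]
        simp [List.append_assoc]
      · simp only [gt_iff_lt, hx, if_false, decide_false]
        exact ih rest h

lemma survivorsOf_zero (lst : List Int) : survivorsOf 0 lst = lst := by
  unfold survivorsOf
  rw [List.filter_eq_self.mpr (fun v _ => by simp)]
  simp

-- one full round maps round-k survivors to round-(k+1) survivors
lemma round_surv (k : Int) (hk : 0 ≤ k) (lst : List Int) :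
    ((survivorsOf k lst).map (fun w => w - 1)).filter (fun w => decide (0 < w))
      = survivorsOf (k + 1) lst := by
  induction lst with
  | nil => rfl
  | cons v tl ih =>
    unfold survivorsOf at *
    simp only [List.filter_cons]
    by_cases h1 : k < max v 1
    · simp only [h1, decide_true, if_true, List.map_cons, List.filter_cons]
      by_cases h2 : (0:Int) < v - k - 1
      · have h3 : k + 1 < max v 1 := by omega
        simp only [h2, decide_true, if_true, h3, List.map_cons]
        rw [ih]
        congr 1
        omega
      · have h3 : ¬ (k + 1 < max v 1) := by omega
        simp only [h2, decide_false, Bool.false_eq_true, if_false, h3]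
        exact ih
    · have h3 : ¬ (k + 1 < max v 1) := by omega
      simp only [h1, decide_false, Bool.false_eq_true, if_false, h3]
      exact ih

lemma fPops_zero (lst : List Int) : fPops 0 lst = 0 := by
  unfold fPops
  induction lst with
  | nil => rfl
  | cons v tl ih => simp only [List.map_cons, List.sum_cons, ih]; omega

lemma fPops_nonneg (k : Int) (_hk : 0 ≤ k) (lst : List Int) : 0 ≤ fPops k lst := by
  unfold fPops
  induction lst with
  | nil => simp
  | cons v tl ih => simp only [List.map_cons, List.sum_cons]; omega

lemma fPops_succ (k : Int) (hk : 0 ≤ k) (lst : List Int) :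
    fPops (k + 1) lst = fPops k lst + ((survivorsOf k lst).length : Int) := by
  unfold fPops survivorsOf
  induction lst with
  | nil => simp
  | cons v tl ih =>
    simp only [List.map_cons, List.sum_cons, List.filter_cons]
    by_cases h1 : k < max v 1
    · simp only [h1, decide_true, if_true, List.map_cons, List.length_cons]
      push_cast
      omega
    · simp only [h1, decide_false, Bool.false_eq_true, if_false]
      omega

-- characterisation of A's loop after the pops of k full rounds
lemma endDayLoop_char (k : Int) (hk : 0 ≤ k) (lst : List Int) :
    endDayLoop (fPops k lst).toNat lst = survivorsOf k lst := by
  induction k, hk using Int.le_induction with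
  | base => rw [fPops_zero, survivorsOf_zero]; rfl
  | succ k hk ih =>
    have hlen : (fPops (k + 1) lst).toNat
        = (fPops k lst).toNat + (survivorsOf k lst).length := by
      have := fPops_succ k hk lst
      have := fPops_nonneg k hk lst
      omega
    rw [hlen, endDayLoop_add, ih,
      endDayLoop_partial _ _ (le_refl _), List.drop_length, List.take_length,
      List.nil_append, round_surv k hk]

lemma bsearchK_spec (lst : List Int) (mm : Int) :
    ∀ (fuel : Nat) (lo hi : Int), 0 ≤ lo → lo < hi →
      fPops lo lst ≤ mm → mm < fPops hi lst → (hi - lo).toNat ≤ fuel →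
      0 ≤ bsearchK fuel lo hi mm lst ∧
      fPops (bsearchK fuel lo hi mm lst) lst ≤ mm ∧
      mm < fPops (bsearchK fuel lo hi mm lst + 1) lst := by
  intro fuel
  induction fuel with
  | zero => intro lo hi h0 hlt _ _ hf; omega
  | succ fuel ih =>
    intro lo hi h0 hlt hflo hfhi hf
    rw [bsearchK]
    by_cases hsmall : hi - lo ≤ 1
    · have : hi = lo + 1 := by omega
      subst this
      simp only [hsmall, if_true]
      exact ⟨h0, hflo, hfhi⟩
    · simp only [hsmall, if_false]
      have hmid : PySem.Int.floordiv (lo + hi) 2 = (lo + hi) / 2 :=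
        PySem.Int.floordiv_eq_ediv_of_pos (by omega)
      have hmid1 : lo < PySem.Int.floordiv (lo + hi) 2 := by rw [hmid]; omega
      have hmid2 : PySem.Int.floordiv (lo + hi) 2 < hi := by rw [hmid]; omega
      by_cases hc : fPops (PySem.Int.floordiv (lo + hi) 2) lst ≤ mm
      · simp only [hc, if_true]
        exact ih _ _ (by omega) hmid2 hc hfhi (by omega)
      · simp only [hc, if_false]
        exact ih _ _ h0 hmid1 hflo (by omega) (by omega)

lemma len_le_total (lst : List Int) :
    (lst.length : Int) ≤ (lst.map (fun v => max v 1)).sum := by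
  induction lst with
  | nil => simp
  | cons v tl ih => simp only [List.length_cons, List.map_cons, List.sum_cons]; push_cast; omega

lemma fPops_of_ge (k : Int) (lst : List Int) (h : ∀ v ∈ lst, max v 1 ≤ k) :
    fPops k lst = (lst.map (fun v => max v 1)).sum := by
  unfold fPops
  induction lst with
  | nil => rfl
  | cons v tl ih =>
    simp only [List.map_cons, List.sum_cons]
    rw [ih (fun v hv => h v (List.mem_cons_of_mem _ hv))]
    have := h v List.mem_cons_self
    omega

lemma surv_of_ge (k : Int) (lst : List Int) (h : ∀ v ∈ lst, max v 1 ≤ k) :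
    survivorsOf k lst = [] := by
  unfold survivorsOf
  rw [List.filter_eq_nil_iff.mpr (fun v hv => by have := h v hv; simp; omega)]
  rfl

theorem end_day_spec_main (m : Int) (lst : List Int)
    (hpre : m ≤ (lst.map (fun v => max v 1)).sum) :
    end_day m lst = end_day_alt m lst := by
  unfold end_day end_day_alt
  have htot0 : (0:Int) ≤ (lst.map (fun v => max v 1)).sum := by
    have := len_le_total lst; omega
  by_cases htot : (lst.map (fun v => max v 1)).sum ≤ max m 0
  · simp only [htot, if_true]
    have hnil : endDayLoop m.toNat lst = [] := by
      by_cases hm : m ≤ 0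
      · have hlst : lst = [] := by
          have := len_le_total lst
          have : lst.length = 0 := by omega
          exact List.length_eq_zero_iff.mp this
        subst hlst
        rw [endDayLoop_nil]
      · have hcap : ∀ v ∈ lst, max v 1 ≤ (lst.map (fun v => max v 1)).sum := by
          intro v hv
          refine List.single_le_sum (fun x hx => ?_) _ (List.mem_map_of_mem hv)
          simp only [List.mem_map] at hx
          obtain ⟨w, _, rfl⟩ := hx
          omega
        have h1 : m.toNat = (fPops ((lst.map (fun v => max v 1)).sum) lst).toNat := by
          rw [fPops_of_ge _ _ hcap]; omega
        rw [h1, endDayLoop_char _ htot0, surv_of_ge _ _ hcap]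
    rw [hnil]
    rfl
  · simp only [htot, if_false]
    set total := (lst.map (fun v => max v 1)).sum with hT
    set H := (lst.map (fun v => max v 1)).foldl max 0 with hH
    have hHcap : ∀ v ∈ lst, max v 1 ≤ H := by
      intro v hv
      exact (PySem.List.le_foldl_max (lst.map (fun v => max v 1)) 0).2 _ (List.mem_map_of_mem hv)
    have hH0 : (0:Int) ≤ H := (PySem.List.le_foldl_max (lst.map (fun v => max v 1)) 0).1
    have hfH : fPops H lst = total := fPops_of_ge _ _ hHcap
    have hmm0 : (0:Int) ≤ max m 0 := by omega
    have hmmlt : max m 0 < fPops H lst := by rw [hfH]; omega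
    have hf0 : fPops 0 lst = 0 := fPops_zero lst
    have hHpos : 0 < H := by
      by_contra hc
      have : H = 0 := by omega
      rw [this, hf0] at hmmlt
      omega
    obtain ⟨hk0, hk1, hk2⟩ := bsearchK_spec lst (max m 0) H.toNat 0 H (le_refl 0) hHpos
      (by rw [hf0]; omega) hmmlt (by omega)
    set k := bsearchK H.toNat 0 H (max m 0) lst with hkdef
    have hsucc := fPops_succ k hk0 lst
    have hfk0 := fPops_nonneg k hk0 lst
    have htle : (max m 0 - fPops k lst).toNat ≤ (survivorsOf k lst).length := by omega
    have hsplit : m.toNat = (fPops k lst).toNat + (max m 0 - fPops k lst).toNat := by omega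
    have hloop : endDayLoop m.toNat lst =
        (survivorsOf k lst).drop (max m 0 - fPops k lst).toNat ++
          (((survivorsOf k lst).take (max m 0 - fPops k lst).toNat).map (fun w => w - 1)).filter
            (fun w => decide (0 < w)) := by
      rw [hsplit, endDayLoop_add, endDayLoop_char k hk0,
        endDayLoop_partial _ _ htle]
    rw [hloop]

-- ===== VERDICT (by name: the statement is the Claim_ definition above) =====
theorem end_day_spec : Claim_equal_end_day := by
  intro m lst _ hpre
  exact end_day_spec_main m lst hpre
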